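-- pv_equiv track=rewrite | github.com/kiryong-lee/Algorithm | programmers/42890.py | uniqueness
-- ===== SOURCE A (Python) =====
-- def uniqueness(col, relation):
--     check_dict = dict()
--     for i in range(len(relation)):
--         value = ''
--         for c in col:
--             value += relation[i][c] + "^"
--         if value in check_dict:
--             return False
--         check_dict[value] = value
--
--     return True
-- ===== SOURCE B (Python) =====
-- def uniqueness(col, relation):
--     keys = []
--     for row in relation:
--         value = ''
--         for c in col:
--             value += row[c] + "^"
--         keys.append(value)
--     keys.sort()
--     for i in range(1, len(keys)):
--         if keys[i - 1] == keys[i]: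
--             return False
--     return True
-- ===== Notes on version B (the rewrite author's own statement) =====
-- stated objective: alternative
-- what changed: Replaces A's incremental dict-based early-exit duplicate detection with building all composite row keys, sorting the list, and comparing adjacent entries.
-- outside the precondition, e.g. on uniqueness([0], [['a'], ['a'], []]): A returns False, B raises IndexError
import Mathlib
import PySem

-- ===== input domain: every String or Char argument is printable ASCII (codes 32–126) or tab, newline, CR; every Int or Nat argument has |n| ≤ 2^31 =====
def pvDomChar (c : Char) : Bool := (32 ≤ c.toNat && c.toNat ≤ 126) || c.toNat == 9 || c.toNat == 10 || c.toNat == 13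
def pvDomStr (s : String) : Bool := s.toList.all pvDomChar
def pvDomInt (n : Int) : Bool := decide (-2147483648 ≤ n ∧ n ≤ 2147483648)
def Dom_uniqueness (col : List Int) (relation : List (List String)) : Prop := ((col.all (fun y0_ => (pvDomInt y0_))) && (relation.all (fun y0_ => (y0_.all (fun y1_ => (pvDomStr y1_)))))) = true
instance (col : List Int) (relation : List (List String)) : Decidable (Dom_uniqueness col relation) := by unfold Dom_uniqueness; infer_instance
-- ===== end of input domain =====

-- B replaces A's incremental dict-based early-exit dedup by building all composite
-- row keys, sorting them, and scanning adjacent pairs (alternative algorithm, same cost class).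

-- value = ''; for c in col: value += row[c] + "^"   (shared by both Pythons; kept on the List Char side, exact for the ASCII domain)
def pvKey (col : List Int) (row : List String) : List Char :=
  col.foldl (fun s c => s ++ (PySem.List.pyGetD row c "").toList ++ ['^']) []

-- ===== PORT A =====
-- for i in range(len(relation)): … early return False on a key already in check_dict
def pvGoA (col : List Int) (rows : List (List String)) (d : PySem.Dict (List Char) (List Char)) : Bool :=
  match rows with
  | [] => true
  | r :: rs =>
    let value := pvKey col r
    if d.contains value then false
    else pvGoA col rs (d.insert value value)

def uniqueness (col : List Int) (relation : List (List String)) : Bool :=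
  pvGoA col relation PySem.Dict.empty

-- ===== PORT B =====
-- for i in range(1, len(keys)): if keys[i-1] == keys[i]: return False
def pvAdjDup (l : List (List Char)) : Bool :=
  match l with
  | a :: b :: t => a == b || pvAdjDup (b :: t)
  | _ => false

def uniqueness_alt (col : List Int) (relation : List (List String)) : Bool :=
  let keys := relation.map (pvKey col)
  !pvAdjDup (PySem.List.sorted keys (fun x => x) false)

-- ===== PRECONDITION & SPEC =====
-- Pre_ excludes inputs where some column index is out of range for some row: there Python A
-- raises IndexError — except when A early-returns False on a duplicate among earlier rows,
-- an early-exit accident of A's scan order that B (which keys every row before sorting)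
-- cannot reach: B raises IndexError on those inputs.
def Pre_uniqueness (col : List Int) (relation : List (List String)) : Prop :=
  ∀ row ∈ relation, ∀ c ∈ col, PySem.Raise.InRange row.length c
instance (col : List Int) (relation : List (List String)) : Decidable (Pre_uniqueness col relation) := by unfold Pre_uniqueness; infer_instance

def pvWitness_uniqueness : List Int × List (List String) :=
  ([0, -1], [["a", "b"], ["a", "c"]])

def Spec_uniqueness (col : List Int) (relation : List (List String)) (out : Bool) : Prop := out = uniqueness_alt col relation
instance (col : List Int) (relation : List (List String)) (out : Bool) : Decidable (Spec_uniqueness col relation out) := by unfold Spec_uniqueness; infer_instance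

-- ===== CLAIM (what is proved, stated in full; the proofs are below) =====
def Claim_equal_uniqueness : Prop := ∀ (col : List Int) (relation : List (List String)), Dom_uniqueness col relation → Pre_uniqueness col relation → Spec_uniqueness col relation (uniqueness col relation)

-- ===== LEMMAS AND PROOFS =====

-- A's loop succeeds iff the keys of the remaining rows are distinct and none is already in the dict
lemma pvGoA_true_iff (col : List Int) (rows : List (List String))
    (d : PySem.Dict (List Char) (List Char)) :
    pvGoA col rows d = true ↔
      (rows.map (pvKey col)).Nodup ∧ ∀ k ∈ rows.map (pvKey col), d.contains k = false := by
  induction rows generalizing d with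
  | nil => simp [pvGoA]
  | cons r rs ih =>
    by_cases h : d.contains (pvKey col r)
    · simp only [pvGoA, h, if_true]
      constructor
      · intro hfalse; cases hfalse
      · rintro ⟨_, hall⟩
        have hc := hall (pvKey col r) (by simp)
        rw [h] at hc; cases hc
    · simp only [pvGoA, h, if_false, Bool.false_eq_true, ih, List.map_cons,
        List.nodup_cons, List.mem_cons]
      constructor
      · rintro ⟨hnd, hall⟩
        refine ⟨⟨?_, hnd⟩, ?_⟩
        · intro hmem
          have := hall _ hmem
          simp at this
        · rintro k (rfl | hk)
          · simpa using h
          · have := hall _ hk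
            simp [PySem.Dict.contains_insert] at this
            exact this.2
      · rintro ⟨⟨hne, hnd⟩, hall⟩
        refine ⟨hnd, ?_⟩
        intro k hk
        simp only [PySem.Dict.contains_insert, Bool.or_eq_false_iff, beq_eq_false_iff_ne]
        exact ⟨fun he => hne (he ▸ hk), hall k (Or.inr hk)⟩

-- the adjacent scan on a ≤-sorted list detects exactly non-distinctness
lemma pvAdjDup_false_iff : ∀ (l : List (List Char)), l.Pairwise (· ≤ ·) →
    (pvAdjDup l = false ↔ l.Nodup)
  | [], _ => by simp [pvAdjDup]
  | [a], _ => by simp [pvAdjDup]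
  | a :: b :: t, hp => by
    have hp' : (b :: t).Pairwise (· ≤ ·) := hp.tail
    have hrec := pvAdjDup_false_iff (b :: t) hp'
    simp only [pvAdjDup, Bool.or_eq_false_iff, beq_eq_false_iff_ne, hrec, List.nodup_cons,
      List.mem_cons]
    constructor
    · rintro ⟨hne, hnin, hnd⟩
      refine ⟨?_, hnin, hnd⟩
      rintro (rfl | hat)
      · exact hne rfl
      · have hab : a ≤ b := (List.pairwise_cons.mp hp).1 b (List.mem_cons_self ..)
        have hba : b ≤ a := (List.pairwise_cons.mp hp').1 a hat
        exact hne (le_antisymm hab hba)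
    · rintro ⟨hnot, hnin, hnd⟩
      exact ⟨fun he => hnot (Or.inl he), hnin, hnd⟩

-- ===== VERDICT (by name: the statement is the Claim_ definition above) =====
theorem uniqueness_spec : Claim_equal_uniqueness := by
  intro col relation _ _
  unfold Spec_uniqueness uniqueness uniqueness_alt
  show pvGoA col relation PySem.Dict.empty =
    !pvAdjDup (PySem.List.sorted (List.map (pvKey col) relation) (fun x => x) false)
  have heq : PySem.List.sorted (List.map (pvKey col) relation) (fun x => x) false =
      @PySem.List.sorted (List Char) (List Char) List.instLinearOrder.toLT
        LinearOrder.toDecidableLT (List.map (pvKey col) relation) (fun x => x) false := by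
    congr 1
  rw [heq]
  have hA : pvGoA col relation PySem.Dict.empty = true ↔ (List.map (pvKey col) relation).Nodup := by
    rw [pvGoA_true_iff]
    have hemp : ∀ k : List Char,
        (PySem.Dict.empty : PySem.Dict (List Char) (List Char)).contains k = false := fun _ => rfl
    simp [hemp]
  have hperm := @PySem.List.sorted_perm (List Char) (List Char) List.instLinearOrder.toLT
    LinearOrder.toDecidableLT (relation.map (pvKey col)) (fun x => x) false
  have hpair := PySem.List.sorted_pairwise (relation.map (pvKey col)) (fun x => x)
  have hB := (pvAdjDup_false_iff _ hpair).trans hperm.nodup_iff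
  by_cases hnd : (relation.map (pvKey col)).Nodup
  · rw [hA.mpr hnd, hB.mpr hnd]; rfl
  · have h1 : pvGoA col relation PySem.Dict.empty = false := by
      rcases Bool.eq_false_or_eq_true (pvGoA col relation PySem.Dict.empty) with h | h
      · exact absurd (hA.mp h) hnd
      · exact h
    have h2 : pvAdjDup (@PySem.List.sorted (List Char) (List Char) List.instLinearOrder.toLT
        LinearOrder.toDecidableLT (List.map (pvKey col) relation) (fun x => x) false) = true := by
      rcases Bool.eq_false_or_eq_true (pvAdjDup (@PySem.List.sorted (List Char) (List Char)
        List.instLinearOrder.toLT LinearOrder.toDecidableLT (List.map (pvKey col) relation)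
        (fun x => x) false)) with h | h
      · exact h
      · exact absurd (hB.mp h) hnd
    rw [h1, h2]; rfl
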